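-- pv_equiv track=rewrite | github.com/Oichkatzelesfrettschen/open_gororoba | src/scripts/analysis/build_canonical_claims_matrix.py | _parse_table_line_cells
-- ===== SOURCE A (Python) =====
-- def _parse_table_line_cells(line: str) -> list[str]:
--     """
--     Parse a markdown-table row into cells, respecting escaped pipes ('\\|') and
--     code spans (backticks).
--     """
--     if not (line.startswith("|") and line.rstrip().endswith("|")):
--         return []
--
--     cells: list[str] = []
--     buf: list[str] = []
--     escaped = False
--     in_code = False
--
--     i = 1  # skip leading pipe
--     while i < len(line):
--         ch = line[i]
--         if escaped:
--             buf.append(ch)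
--             escaped = False
--             i += 1
--             continue
--         if ch == "\\":
--             escaped = True
--             buf.append(ch)
--             i += 1
--             continue
--         if ch == "`":
--             in_code = not in_code
--             buf.append(ch)
--             i += 1
--             continue
--         if ch == "|" and not in_code:
--             cells.append("".join(buf).strip())
--             buf = []
--             i += 1
--             continue
--         buf.append(ch)
--         i += 1
--
--     if cells and cells[-1] == "":
--         cells = cells[:-1]
--     return cells
-- ===== SOURCE B (Python) =====
-- def _parse_table_line_cells(line: str) -> list[str]:
--     """Two-phase variant: record the index of every unescaped, non-code-span
--     pipe delimiter in one scan, then build the cells by slicing between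
--     consecutive delimiter indices."""
--     if not (line.startswith("|") and line.rstrip().endswith("|")):
--         return []
--
--     marks = [0]  # position of the leading pipe
--     escaped = False
--     in_code = False
--     for i, ch in enumerate(line[1:], start=1):
--         if escaped:
--             escaped = False
--         elif ch == "\\":
--             escaped = True
--         elif ch == "`":
--             in_code = not in_code
--         elif ch == "|" and not in_code:
--             marks.append(i)
--
--     cells = [line[a + 1 : b].strip() for a, b in zip(marks, marks[1:])]
--     if cells and cells[-1] == "":
--         cells.pop()
--     return cells
-- ===== Notes on version B (the rewrite author's own statement) =====
-- stated objective: alternative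
-- what changed: B replaces A's accumulate-and-flush character buffer with a two-phase scheme: one scan records the indices of unescaped, non-code-span pipes, then cells are built by slicing the line between consecutive recorded indices and stripping each slice.
import Mathlib
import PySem

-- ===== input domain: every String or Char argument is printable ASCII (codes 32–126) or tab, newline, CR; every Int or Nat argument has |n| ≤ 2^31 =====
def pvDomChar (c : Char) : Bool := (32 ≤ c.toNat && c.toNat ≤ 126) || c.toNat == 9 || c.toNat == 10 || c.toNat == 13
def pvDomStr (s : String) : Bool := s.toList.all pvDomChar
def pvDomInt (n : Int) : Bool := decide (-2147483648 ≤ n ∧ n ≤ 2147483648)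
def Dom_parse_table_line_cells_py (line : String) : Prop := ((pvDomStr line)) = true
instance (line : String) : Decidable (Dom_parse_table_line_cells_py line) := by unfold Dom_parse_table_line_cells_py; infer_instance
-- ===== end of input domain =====

-- B records the indices of the unescaped, non-code-span pipes in one scan and then
-- builds the cells by slicing between consecutive indices (objective: alternative
-- decomposition — positions + slices instead of a character buffer).

-- ===== PORT A =====
-- A's while-loop: state (escaped, in_code, buf, cells), consuming the chars from index 1 on.
def pvALoop : List Char → Bool → Bool → List Char → List String → List String
  | [], _, _, _, cells => cells
  | ch :: rest, escaped, in_code, buf, cells =>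
    if escaped then
      pvALoop rest false in_code (buf ++ [ch]) cells
    else if ch = '\\' then
      pvALoop rest true in_code (buf ++ [ch]) cells
    else if ch = '`' then
      pvALoop rest escaped (!in_code) (buf ++ [ch]) cells
    else if ch = '|' && !in_code then
      pvALoop rest escaped in_code [] (cells ++ [String.ofList (PySem.Chars.strip buf)])
    else
      pvALoop rest escaped in_code (buf ++ [ch]) cells

def parse_table_line_cells_py (line : String) : List String :=
  if !(PySem.Str.startswith line "|" && PySem.Str.endswith (PySem.Str.rstrip line) "|") then
    []
  else
    let cells := pvALoop (line.toList.drop 1) false false [] []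
    -- if cells and cells[-1] == "": cells = cells[:-1]
    if cells ≠ [] ∧ cells.getLast? = some "" then cells.dropLast else cells

-- ===== PORT B =====
-- B's first scan: enumerate(line[1:], start=1), collecting the delimiter positions.
def pvBLoop : List Char → Nat → Bool → Bool → List Nat → List Nat
  | [], _, _, _, marks => marks
  | ch :: rest, i, escaped, in_code, marks =>
    if escaped then
      pvBLoop rest (i + 1) false in_code marks
    else if ch = '\\' then
      pvBLoop rest (i + 1) true in_code marks
    else if ch = '`' then
      pvBLoop rest (i + 1) escaped (!in_code) marks
    else if ch = '|' && !in_code then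
      pvBLoop rest (i + 1) escaped in_code (marks ++ [i])
    else
      pvBLoop rest (i + 1) escaped in_code marks

-- [line[a+1:b].strip() for a, b in zip(marks, marks[1:])]
def pvBCells (cs : List Char) (marks : List Nat) : List String :=
  (marks.zip marks.tail).map fun p =>
    String.ofList (PySem.Chars.strip (PySem.List.slice cs (some ((p.1 + 1 : Nat) : Int)) (some ((p.2 : Nat) : Int))))

def parse_table_line_cells_py_alt (line : String) : List String :=
  if !(PySem.Str.startswith line "|" && PySem.Str.endswith (PySem.Str.rstrip line) "|") then
    []
  else
    let cs := line.toList
    let marks := pvBLoop (cs.drop 1) 1 false false [0]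
    let cells := pvBCells cs marks
    -- if cells and cells[-1] == "": cells.pop()
    if cells ≠ [] ∧ cells.getLast? = some "" then cells.dropLast else cells

-- ===== PRECONDITION & SPEC =====
def Spec_parse_table_line_cells_py (line : String) (out : List String) : Prop := out = parse_table_line_cells_py_alt line
instance (line : String) (out : List String) : Decidable (Spec_parse_table_line_cells_py line out) := by unfold Spec_parse_table_line_cells_py; infer_instance

-- ===== CLAIM (what is proved, stated in full; the proofs are below) =====
def Claim_equal_parse_table_line_cells_py : Prop := ∀ (line : String), Dom_parse_table_line_cells_py line → Spec_parse_table_line_cells_py line (parse_table_line_cells_py line)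

-- ===== LEMMAS AND PROOFS =====

-- pvBCells in drop/take form (slice with natural bounds).
lemma pvBCells_eq (cs : List Char) (marks : List Nat) :
    pvBCells cs marks = (marks.zip marks.tail).map fun p =>
      String.ofList (PySem.Chars.strip ((cs.drop (p.1 + 1)).take (p.2 - (p.1 + 1)))) := by
  unfold pvBCells
  refine List.map_congr_left fun p _ => ?_
  rw [PySem.List.slice_natCast]

-- appending a fresh mark appends one (last, new) pair to the zip
lemma zip_tail_append (m : List Nat) (l i : Nat) (h : m.getLast? = some l) :
    (m ++ [i]).zip (m ++ [i]).tail = m.zip m.tail ++ [(l, i)] := by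
  induction m with
  | nil => simp at h
  | cons a t ih =>
    cases t with
    | nil => simp_all
    | cons b t' =>
      have := ih (by simpa using h)
      simpa [List.zip] using this

-- main invariant: A's loop state corresponds to B's recorded marks
lemma loop_equiv (cs : List Char) :
    ∀ (L : List Char) (i : Nat) (esc code : Bool) (m : List Nat) (l : Nat),
      L.drop i = cs → m.getLast? = some l → l + 1 ≤ i →
      pvALoop cs esc code ((L.drop (l + 1)).take (i - (l + 1))) (pvBCells L m)
        = pvBCells L (pvBLoop cs i esc code m) := by
  induction cs with
  | nil => intro L i esc code m l _ _ _; simp [pvALoop, pvBLoop]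
  | cons ch rest ih =>
    intro L i esc code m l hdrop hlast hle
    have hiL : i < L.length := by
      by_contra h
      rw [List.drop_eq_nil_of_le (by omega)] at hdrop
      simp at hdrop
    have hget : L[i]? = some ch := by
      have h0 : (L.drop i)[0]? = L[i + 0]? := List.getElem?_drop
      rw [hdrop] at h0
      simpa using h0.symm
    have hdrop' : L.drop (i + 1) = rest := by
      have h1 : List.drop 1 (List.drop i L) = List.drop (i + 1) L := List.drop_drop
      rw [← h1, hdrop]
      rfl
    have hbuf : (L.drop (l + 1)).take (i + 1 - (l + 1)) =
        (L.drop (l + 1)).take (i - (l + 1)) ++ [ch] := by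
      rw [show i + 1 - (l + 1) = (i - (l + 1)) + 1 by omega, List.take_add_one]
      have h2 : (L.drop (l + 1))[i - (l + 1)]? = L[(l + 1) + (i - (l + 1))]? :=
        List.getElem?_drop
      rw [show (l + 1) + (i - (l + 1)) = i by omega] at h2
      simp [h2, hget]
    by_cases hesc : esc = true
    · subst hesc
      have h := ih L (i + 1) false code m l hdrop' hlast (by omega)
      rw [hbuf] at h
      simpa [pvALoop, pvBLoop] using h
    · replace hesc : esc = false := by cases esc <;> simp_all
      subst hesc
      by_cases hbs : ch = '\\'
      · have h := ih L (i + 1) true code m l hdrop' hlast (by omega)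
        rw [hbuf] at h
        simpa [pvALoop, pvBLoop, hbs] using h
      · by_cases hbt : ch = '`'
        · have h := ih L (i + 1) false (!code) m l hdrop' hlast (by omega)
          rw [hbuf] at h
          simpa [pvALoop, pvBLoop, hbs, hbt] using h
        · by_cases hpipe : (ch = '|' && !code) = true
          · have hcells : pvBCells L (m ++ [i]) = pvBCells L m ++
                [String.ofList (PySem.Chars.strip ((L.drop (l + 1)).take (i - (l + 1))))] := by
              rw [pvBCells_eq, pvBCells_eq, zip_tail_append m l i hlast]
              simp
            have h := ih L (i + 1) false code (m ++ [i]) i hdrop' (by simp) (by omega)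
            simp only [Nat.sub_self, List.take_zero, hcells] at h
            simpa [pvALoop, pvBLoop, hbs, hbt, hpipe] using h
          · have h := ih L (i + 1) false code m l hdrop' hlast (by omega)
            rw [hbuf] at h
            simpa [pvALoop, pvBLoop, hbs, hbt, hpipe] using h

-- ===== VERDICT (by name: the statement is the Claim_ definition above) =====
theorem parse_table_line_cells_py_spec : Claim_equal_parse_table_line_cells_py := by
  intro line _
  unfold Spec_parse_table_line_cells_py parse_table_line_cells_py parse_table_line_cells_py_alt
  have h := loop_equiv (line.toList.drop 1) line.toList 1 false false [0] 0 rfl rfl (by omega)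
  simp only [Nat.sub_self, List.take_zero] at h
  rw [show pvBCells line.toList [0] = [] from rfl] at h
  rw [h]
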